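-- pv_equiv track=rewrite | github.com/armandosouza/ossu-computer-science | cs50p/test_plates/plates.py | verify_number_in_middle
-- ===== SOURCE A (Python) =====
-- def verify_number_in_middle(plate):
--     first_number = False
--     letter_after_number = False
--     ending_plate = plate[2:]
--     if ending_plate[0] == "0":
--         return False
--     for c in ending_plate:
--         if first_number == False and c.isdigit():
--             first_number = True
--         elif first_number and c.isalpha():
--             letter_after_number = True
--     if(first_number and letter_after_number):
--         return False
--     else:
--         return True
-- ===== SOURCE B (Python) =====
-- def verify_number_in_middle(plate):
--     ending = plate[2:]
--     if ending[0] == "0":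
--         return False
--     first_digit_index = None
--     for i, c in enumerate(ending):
--         if c.isdigit():
--             first_digit_index = i
--             break
--     if first_digit_index is None:
--         return True
--     return not any(c.isalpha() for c in ending[first_digit_index + 1:])
-- ===== Notes on version B (the rewrite author's own statement) =====
-- stated objective: simpler
-- what changed: Replaces A's two-flag state machine over the whole suffix with a scan that locates the first digit and then checks that no letter occurs later (with early exit), keeping the leading-zero guard.
import Mathlib
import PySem

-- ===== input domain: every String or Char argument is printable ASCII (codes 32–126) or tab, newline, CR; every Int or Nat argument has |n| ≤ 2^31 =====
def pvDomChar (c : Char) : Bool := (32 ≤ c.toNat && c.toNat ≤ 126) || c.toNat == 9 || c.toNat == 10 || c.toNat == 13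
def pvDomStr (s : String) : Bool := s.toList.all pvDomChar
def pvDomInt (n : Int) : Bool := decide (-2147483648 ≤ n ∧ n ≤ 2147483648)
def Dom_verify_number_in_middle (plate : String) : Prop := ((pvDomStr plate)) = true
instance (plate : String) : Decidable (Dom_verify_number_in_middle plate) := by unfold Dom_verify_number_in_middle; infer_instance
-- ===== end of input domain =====

-- B replaces A's two-flag state machine with a find-first-digit scan plus an
-- 'any letter after it' check (objective: simpler).

-- ===== PORT A =====
-- one iteration of A's for-loop: state = (first_number, letter_after_number)
def stepA (st : Bool × Bool) (c : Char) : Bool × Bool :=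
  if (st.1 == false) && PySem.Chars.isdigit c then (true, st.2)
  else if st.1 && PySem.Chars.isalpha c then (st.1, true)
  else st

def verify_number_in_middle (plate : String) : Bool :=
  let ending := PySem.Str.slice plate (some 2) none
  match PySem.Str.pyGet? ending 0 with
  | none => false   -- IndexError in Python; excluded by Pre_
  | some c0 =>
    if c0 = '0' then false
    else
      let st := ending.toList.foldl stepA (false, false)
      if st.1 && st.2 then false else true

-- ===== PORT B =====
def verify_number_in_middle_alt (plate : String) : Bool :=
  let ending := PySem.Str.slice plate (some 2) none
  match PySem.Str.pyGet? ending 0 with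
  | none => false   -- IndexError in Python; excluded by Pre_
  | some c0 =>
    if c0 = '0' then false
    else
      match ending.toList.findIdx? PySem.Chars.isdigit with
      | none => true
      | some i => !((ending.toList.drop (i + 1)).any PySem.Chars.isalpha)

-- ===== PRECONDITION & SPEC =====
-- Python A raises IndexError (ending_plate[0]) exactly when len(plate) < 3.
def Pre_verify_number_in_middle (plate : String) : Prop := 3 ≤ plate.toList.length
instance (plate : String) : Decidable (Pre_verify_number_in_middle plate) := by
  unfold Pre_verify_number_in_middle; infer_instance
def pvWitness_verify_number_in_middle : String := "AAA123"

def Spec_verify_number_in_middle (plate : String) (out : Bool) : Prop := out = verify_number_in_middle_alt plate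
instance (plate : String) (out : Bool) : Decidable (Spec_verify_number_in_middle plate out) := by unfold Spec_verify_number_in_middle; infer_instance

-- ===== CLAIM (what is proved, stated in full; the proofs are below) =====
def Claim_equal_verify_number_in_middle : Prop := ∀ (plate : String), Dom_verify_number_in_middle plate → Pre_verify_number_in_middle plate → Spec_verify_number_in_middle plate (verify_number_in_middle plate)

-- ===== LEMMAS AND PROOFS =====

theorem stepA_true (lan : Bool) (c : Char) :
    stepA (true, lan) c = (true, lan || PySem.Chars.isalpha c) := by
  by_cases h : PySem.Chars.isalpha c = true <;> simp [stepA, h]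

theorem stepA_false (lan : Bool) (c : Char) :
    stepA (false, lan) c = if PySem.Chars.isdigit c then (true, lan) else (false, lan) := by
  by_cases h : PySem.Chars.isdigit c = true <;> simp [stepA, h]

-- Once first_number is set, A's fold only accumulates 'letter seen'.
theorem foldA_after_digit (l : List Char) (lan : Bool) :
    l.foldl stepA (true, lan) = (true, lan || l.any PySem.Chars.isalpha) := by
  induction l generalizing lan with
  | nil => simp
  | cons c t ih => rw [List.foldl_cons, stepA_true, ih, List.any_cons, Bool.or_assoc]

-- A's fold from the initial state, characterised by the first digit position.
theorem foldA_from_start (l : List Char) :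
    l.foldl stepA (false, false) =
    (match l.findIdx? PySem.Chars.isdigit with
     | none => (false, false)
     | some i => (true, (l.drop (i + 1)).any PySem.Chars.isalpha)) := by
  induction l with
  | nil => simp
  | cons c t ih =>
    rw [List.foldl_cons, stepA_false]
    by_cases h : PySem.Chars.isdigit c = true
    · simp [h, List.findIdx?_cons, foldA_after_digit]
    · rw [if_neg h, ih]
      simp only [List.findIdx?_cons, h]
      cases hf : t.findIdx? PySem.Chars.isdigit <;> simp [hf]

-- A's loop+flags test equals B's first-digit/any-letter test, on any suffix list.
theorem tailA_eq_tailB (l : List Char) :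
    (if (l.foldl stepA (false, false)).1 && (l.foldl stepA (false, false)).2 then false else true)
    = (match l.findIdx? PySem.Chars.isdigit with
       | none => true
       | some i => !((l.drop (i + 1)).any PySem.Chars.isalpha)) := by
  rw [foldA_from_start]
  cases hf : l.findIdx? PySem.Chars.isdigit with
  | none => rfl
  | some i =>
    cases hb : (l.drop (i + 1)).any PySem.Chars.isalpha <;> simp [hb]

-- ===== VERDICT (by name: the statement is the Claim_ definition above) =====
theorem verify_number_in_middle_spec : Claim_equal_verify_number_in_middle := by
  intro plate _ _
  show verify_number_in_middle plate = verify_number_in_middle_alt plate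
  simp only [verify_number_in_middle, verify_number_in_middle_alt]
  cases hg : PySem.Str.pyGet? (PySem.Str.slice plate (some 2) none) 0 with
  | none => rfl
  | some c0 =>
    by_cases h0 : c0 = '0'
    · simp [hg, h0]
    · simp only [hg, h0, if_false]
      exact tailA_eq_tailB _
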